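-- pv_equiv track=rewrite | github.com/ghltorrhdiddl2/codingtest | p_level1_sj/oct/oct_17/str_sort.py | solution
-- ===== SOURCE A (Python) =====
-- def solution(strings, n):
--     arr = []
--     for i in range(97, 123):
--         for j in strings:
--             if j[n] == chr(i):
--                 arr.append(j)
--     for i in range(0, len(arr)-1):
--         if arr[i][n] == arr[i+1][n]:
--             arr[i:i+2] = sorted(arr[i:i+2])
--
--     return arr
-- ===== SOURCE B (Python) =====
-- def solution(strings, n):
--     # One pass to group strings into per-letter buckets (instead of 26 scans),
--     # then concatenate buckets in alphabetical order and apply the same single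
--     # adjacent-pair pass that conditionally swaps neighbours with equal nth char.
--     buckets = {}
--     for s in strings:
--         c = s[n]
--         if 'a' <= c <= 'z':
--             buckets.setdefault(c, []).append(s)
--     arr = []
--     for i in range(97, 123):
--         arr += buckets.get(chr(i), [])
--     for i in range(len(arr) - 1):
--         if arr[i][n] == arr[i + 1][n] and arr[i] > arr[i + 1]:
--             arr[i], arr[i + 1] = arr[i + 1], arr[i]
--     return arr
-- ===== Notes on version B (the rewrite author's own statement) =====
-- stated objective: faster
-- what changed: A scans the whole input list 26 times (once per letter) to group by the nth character; B builds per-letter buckets in a single pass with dict.setdefault and then concatenates the 26 buckets, and writes the adjacent-pair pass's two-element sorted() as an explicit conditional swap.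
import Mathlib
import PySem

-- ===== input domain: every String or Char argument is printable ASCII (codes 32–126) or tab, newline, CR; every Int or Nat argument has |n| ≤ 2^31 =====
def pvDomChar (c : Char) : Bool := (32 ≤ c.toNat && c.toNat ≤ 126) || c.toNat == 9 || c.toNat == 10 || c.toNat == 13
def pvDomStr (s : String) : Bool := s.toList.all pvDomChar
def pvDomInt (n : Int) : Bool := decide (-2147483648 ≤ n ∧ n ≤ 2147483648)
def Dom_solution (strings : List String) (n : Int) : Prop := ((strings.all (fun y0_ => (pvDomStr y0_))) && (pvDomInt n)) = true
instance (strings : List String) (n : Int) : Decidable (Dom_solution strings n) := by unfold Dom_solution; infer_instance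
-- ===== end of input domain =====

-- B replaces A's 26 scans of `strings` by one bucket-building pass over `strings`
-- followed by a concatenation of the 26 buckets; the final adjacent-pair pass is
-- kept (written as an explicit conditional swap, which is what sorted of a pair does).

-- ===== PORT A =====
-- A, first loop: for i in range(97,123): for j in strings: if j[n]==chr(i): arr.append(j)
-- (j[n] == chr(i) is ported as an Option Char comparison; chr(i) = Char.ofNat i.toNat, exact for 97 ≤ i < 123)
def pvGroupA (strings : List String) (n : Int) : List String :=
  (PySem.List.pyRange 97 123 1).foldl (fun arr i =>
    strings.foldl (fun arr j =>
      if PySem.Str.pyGet? j n == some (Char.ofNat i.toNat) then arr ++ [j] else arr) arr) []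

-- A, second loop body: if arr[i][n] == arr[i+1][n]: arr[i:i+2] = sorted(arr[i:i+2])
def pvBodyA (n : Int) (a : List String) (i : Int) : List String :=
  if PySem.Str.pyGet? (PySem.List.pyGetD a i "") n ==
     PySem.Str.pyGet? (PySem.List.pyGetD a (i + 1) "") n then
    PySem.List.slice a none (some i) ++
      PySem.List.sorted (PySem.List.slice a (some i) (some (i + 2))) (fun s => s) false ++
      PySem.List.slice a (some (i + 2)) none
  else a

-- A, second loop: for i in range(0, len(arr)-1): …
def pvPassA (n : Int) (arr0 : List String) : List String :=
  (PySem.List.pyRange 0 ((arr0.length : Int) - 1) 1).foldl (pvBodyA n) arr0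

def solution (strings : List String) (n : Int) : List String :=
  pvPassA n (pvGroupA strings n)

-- ===== PORT B =====
-- B, bucket pass body: c = s[n]; if 'a' <= c <= 'z': buckets.setdefault(c, []).append(s)
-- (s[n] out of range = IndexError in Python, outside Pre_; the none branch skips)
def pvBucketStep (n : Int) (d : PySem.Dict Char (List String)) (s : String) :
    PySem.Dict Char (List String) :=
  match PySem.Str.pyGet? s n with
  | some c => if 'a' ≤ c ∧ c ≤ 'z' then d.modify c [] (fun l => l ++ [s]) else d
  | none => d

def pvBuckets (strings : List String) (n : Int) : PySem.Dict Char (List String) :=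
  strings.foldl (pvBucketStep n) PySem.Dict.empty

-- B: arr = []; for i in range(97,123): arr += buckets.get(chr(i), [])
def pvConcatB (strings : List String) (n : Int) : List String :=
  (PySem.List.pyRange 97 123 1).foldl
    (fun arr i => arr ++ (pvBuckets strings n).getD (Char.ofNat i.toNat) []) []

-- B, swap-pass body: if arr[i][n] == arr[i+1][n] and arr[i] > arr[i+1]: arr[i],arr[i+1] = arr[i+1],arr[i]
def pvBodyB (n : Int) (a : List String) (i : Int) : List String :=
  if PySem.Str.pyGet? (PySem.List.pyGetD a i "") n ==
       PySem.Str.pyGet? (PySem.List.pyGetD a (i + 1) "") n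
     && decide (PySem.List.pyGetD a (i + 1) "" < PySem.List.pyGetD a i "") then
    PySem.List.pySetD (PySem.List.pySetD a i (PySem.List.pyGetD a (i + 1) ""))
      (i + 1) (PySem.List.pyGetD a i "")
  else a

-- B: for i in range(len(arr) - 1): …
def pvPassB (n : Int) (arr0 : List String) : List String :=
  (PySem.List.pyRange 0 ((arr0.length : Int) - 1) 1).foldl (pvBodyB n) arr0

def solution_alt (strings : List String) (n : Int) : List String :=
  pvPassB n (pvConcatB strings n)

-- ===== PRECONDITION & SPEC =====
-- Pre_ excludes exactly the inputs on which Python A raises IndexError: some string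
-- in `strings` has no character at (possibly negative) index n.
def Pre_solution (strings : List String) (n : Int) : Prop :=
  ∀ s ∈ strings, (PySem.Str.pyGet? s n).isSome = true
instance (strings : List String) (n : Int) : Decidable (Pre_solution strings n) := by
  unfold Pre_solution; infer_instance

def pvWitness_solution : List String × Int := (["ab", "ba", "b!", "zz"], 0)

def Spec_solution (strings : List String) (n : Int) (out : List String) : Prop := out = solution_alt strings n
instance (strings : List String) (n : Int) (out : List String) : Decidable (Spec_solution strings n out) := by unfold Spec_solution; infer_instance

-- ===== CLAIM (what is proved, stated in full; the proofs are below) =====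
def Claim_equal_solution : Prop := ∀ (strings : List String) (n : Int), Dom_solution strings n → Pre_solution strings n → Spec_solution strings n (solution strings n)

-- ===== LEMMAS AND PROOFS =====

theorem pvCharBound (m : Nat) (h1 : 97 ≤ m) (h2 : m ≤ 122) :
    'a' ≤ Char.ofNat m ∧ Char.ofNat m ≤ 'z' := by
  have hv : (Char.ofNat m).toNat = m := by
    unfold Char.ofNat
    rw [dif_pos (Or.inl (by omega : m < 55296) : Nat.isValidChar m)]
    rfl
  have ha : ('a').toNat = 97 := rfl
  have hz : ('z').toNat = 122 := rfl
  constructor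
  · rw [Char.le_def]
    apply UInt32.le_iff_toNat_le.mpr
    show ('a').toNat ≤ (Char.ofNat m).toNat
    omega
  · rw [Char.le_def]
    apply UInt32.le_iff_toNat_le.mpr
    show (Char.ofNat m).toNat ≤ ('z').toNat
    omega

theorem pvSortedPair (x y : String) :
    PySem.List.sorted [x, y] (fun s => s) = if y < x then [y, x] else [x, y] := by
  rw [PySem.List.sorted_eq_foldl_insertBy]
  simp only [List.foldl, PySem.List.insertBy]
  split <;> simp_all

theorem pvSetPair (T R : List String) (x y a b : String) :
    ((T ++ x :: y :: R).set T.length a).set (T.length + 1) b = T ++ a :: b :: R := by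
  rw [List.set_append_right _ _ (le_refl _)]
  simp [List.set_append_right]

theorem pvBucketStep_getD (n : Int) (s : String) (d : PySem.Dict Char (List String))
    (c : Char) (h1 : 'a' ≤ c) (h2 : c ≤ 'z') :
    (pvBucketStep n d s).getD c [] =
      d.getD c [] ++ (if PySem.Str.pyGet? s n == some c then [s] else []) := by
  cases hc : PySem.Str.pyGet? s n with
  | none =>
    simp only [pvBucketStep, hc]
    simp
  | some c' =>
    simp only [pvBucketStep, hc]
    by_cases hcc : c' = c
    · subst hcc
      rw [if_pos ⟨h1, h2⟩, PySem.Dict.getD_modify_self]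
      simp
    · have hne : (some c' == some c) = false := by simp [hcc]
      rw [hne]
      by_cases hr : 'a' ≤ c' ∧ c' ≤ 'z'
      · rw [if_pos hr, PySem.Dict.getD_modify_of_ne _ _ _ (Ne.symm hcc)]
        simp
      · rw [if_neg hr]
        simp

theorem pvBuckets_getD (n : Int) (ss : List String) (d : PySem.Dict Char (List String))
    (c : Char) (h1 : 'a' ≤ c) (h2 : c ≤ 'z') :
    (ss.foldl (pvBucketStep n) d).getD c [] =
      d.getD c [] ++ ss.filter (fun j => PySem.Str.pyGet? j n == some c) := by
  induction ss generalizing d with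
  | nil => simp
  | cons s rest ih =>
    rw [List.foldl_cons, ih, pvBucketStep_getD n s d c h1 h2, List.append_assoc]
    by_cases hp : PySem.List.pyGet? s.toList n = some c
    · simp [hp]
    · simp [hp]

theorem pvGroupA_eq (strings : List String) (n : Int) :
    pvGroupA strings n = (PySem.List.pyRange 97 123 1).flatMap
      (fun i => strings.filter (fun j => PySem.Str.pyGet? j n == some (Char.ofNat i.toNat))) := by
  unfold pvGroupA
  have h : ∀ i ∈ PySem.List.pyRange 97 123 1, ∀ acc : List String,
      strings.foldl (fun arr j =>
        if PySem.Str.pyGet? j n == some (Char.ofNat i.toNat) then arr ++ [j] else arr) acc =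
      acc ++ strings.filter (fun j => PySem.Str.pyGet? j n == some (Char.ofNat i.toNat)) :=
    fun i _ acc => PySem.List.foldl_append_if_eq_filter _ _ _
  rw [PySem.List.foldl_congr_mem' _ _ _ _ h, PySem.List.foldl_append_eq_flatMap,
    List.nil_append]

theorem pvGroup_eq (strings : List String) (n : Int) :
    pvConcatB strings n = pvGroupA strings n := by
  rw [pvGroupA_eq]
  have h : ∀ i ∈ PySem.List.pyRange 97 123 1, ∀ acc : List String,
      acc ++ (pvBuckets strings n).getD (Char.ofNat i.toNat) [] =
      acc ++ strings.filter (fun j => PySem.Str.pyGet? j n == some (Char.ofNat i.toNat)) := by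
    intro i hi acc
    obtain ⟨hl, hr⟩ := PySem.List.mem_pyRange_one.mp hi
    obtain ⟨hb1, hb2⟩ := pvCharBound i.toNat (by omega) (by omega)
    unfold pvBuckets
    rw [pvBuckets_getD n strings PySem.Dict.empty _ hb1 hb2, PySem.Dict.getD_empty,
      List.nil_append]
  unfold pvConcatB
  rw [PySem.List.foldl_congr_mem' _ _ _ _ h, PySem.List.foldl_append_eq_flatMap,
    List.nil_append]

theorem pvStepEq' (n : Int) (T R : List String) (x y : String) :
    pvBodyA n (T ++ x :: y :: R) ((T.length : Nat) : Int) =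
      pvBodyB n (T ++ x :: y :: R) ((T.length : Nat) : Int) ∧
    (pvBodyA n (T ++ x :: y :: R) ((T.length : Nat) : Int)).length =
      (T ++ x :: y :: R).length := by
  have hx : PySem.List.pyGetD (T ++ x :: y :: R) ((T.length : Nat) : Int) "" = x := by
    rw [PySem.List.pyGetD_natCast]
    simp [List.getD_eq_getElem?_getD]
  have hy : PySem.List.pyGetD (T ++ x :: y :: R) (((T.length : Nat) : Int) + 1) "" = y := by
    have hcast : ((T.length : Nat) : Int) + 1 = ((T.length + 1 : Nat) : Int) := by push_cast; ring
    rw [hcast, PySem.List.pyGetD_natCast]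
    simp [List.getD_eq_getElem?_getD]
  have hsl0 : PySem.List.slice (T ++ x :: y :: R) none (some ((T.length : Nat) : Int)) = T := by
    rw [PySem.List.slice_to_natCast]
    exact List.take_left
  have hslice : PySem.List.slice (T ++ x :: y :: R) (some ((T.length : Nat) : Int))
      (some (((T.length : Nat) : Int) + 2)) = [x, y] := by
    have hcast : ((T.length : Nat) : Int) + 2 = ((T.length : Nat) : Int) + ((2 : Nat) : Int) := by
      norm_num
    rw [hcast, PySem.List.slice_natCast_add, List.drop_left]
    rfl
  have hsl2 : PySem.List.slice (T ++ x :: y :: R) (some (((T.length : Nat) : Int) + 2)) none = R := by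
    have hcast : ((T.length : Nat) : Int) + 2 = ((T.length + 2 : Nat) : Int) := by push_cast; ring
    rw [hcast, PySem.List.slice_from_natCast]
    have h2 : T ++ x :: y :: R = (T ++ [x, y]) ++ R := by simp
    rw [h2, show T.length + 2 = (T ++ [x, y]).length by simp]
    exact List.drop_left
  have hsetA : PySem.List.pySetD (T ++ x :: y :: R) ((T.length : Nat) : Int) y =
      (T ++ x :: y :: R).set T.length y := by
    simp [pysem]
  have hsetB : ∀ z : List String,
      PySem.List.pySetD z (((T.length : Nat) : Int) + 1) x = z.set (T.length + 1) x := by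
    intro z
    have hcast : ((T.length : Nat) : Int) + 1 = ((T.length + 1 : Nat) : Int) := by push_cast; ring
    rw [hcast]
    simp only [pysem]
  unfold pvBodyA pvBodyB
  rw [hx, hy, hsl0, hsl2, hslice, pvSortedPair, hsetA, hsetB]
  by_cases hcond : (PySem.Str.pyGet? x n == PySem.Str.pyGet? y n) = true
  · rw [if_pos hcond]
    by_cases hlt : y < x
    · have hbb : (PySem.Str.pyGet? x n == PySem.Str.pyGet? y n && decide (y < x)) = true := by
        rw [hcond]
        simp [hlt]
      rw [if_pos hlt, hbb, if_pos rfl, pvSetPair]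
      exact ⟨by simp, by simp⟩
    · have hbb : (PySem.Str.pyGet? x n == PySem.Str.pyGet? y n && decide (y < x)) = false := by
        rw [hcond]
        simp [hlt]
      rw [if_neg hlt, hbb, if_neg (by simp)]
      exact ⟨by simp, by simp⟩
  · have hA : (PySem.Str.pyGet? x n == PySem.Str.pyGet? y n) = false := by
      cases h : (PySem.Str.pyGet? x n == PySem.Str.pyGet? y n)
      · rfl
      · exact absurd h hcond
    rw [if_neg hcond, hA, Bool.false_and, if_neg (by simp)]
    exact ⟨rfl, rfl⟩

theorem pvStepEq (n : Int) (a : List String) (i : Int) (h0 : 0 ≤ i)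
    (h1 : i + 1 < (a.length : Int)) :
    pvBodyA n a i = pvBodyB n a i ∧ (pvBodyA n a i).length = a.length := by
  have hm0 : i.toNat < a.length := by omega
  have hm1 : i.toNat + 1 < a.length := by omega
  have hdec : a = a.take i.toNat ++ a[i.toNat] :: a[i.toNat + 1] :: a.drop (i.toNat + 2) := by
    conv_lhs => rw [← List.take_append_drop i.toNat a]
    rw [List.drop_eq_getElem_cons hm0, List.drop_eq_getElem_cons hm1]
  have main := pvStepEq' n (a.take i.toNat) (a.drop (i.toNat + 2)) a[i.toNat] a[i.toNat + 1]
  rw [List.length_take_of_le (le_of_lt hm0)] at main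
  rw [← hdec] at main
  have hi : ((i.toNat : Nat) : Int) = i := by omega
  rw [hi] at main
  exact main

theorem pvPass_aux (n : Int) (k : Nat) :
    ∀ (lo : Int) (a : List String), 0 ≤ lo → lo + (k : Int) + 1 = (a.length : Int) →
      (PySem.List.pyRange lo (lo + (k : Int)) 1).foldl (pvBodyA n) a =
        (PySem.List.pyRange lo (lo + (k : Int)) 1).foldl (pvBodyB n) a := by
  induction k with
  | zero =>
    intro lo a _ _
    rw [PySem.List.pyRange_one_eq_nil (by omega)]
    rfl
  | succ k ih =>
    intro lo a hlo hlen
    have hlt : lo < lo + ((k + 1 : Nat) : Int) := by push_cast; omega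
    rw [PySem.List.pyRange_one_cons hlt, List.foldl_cons, List.foldl_cons]
    obtain ⟨heq, hl⟩ := pvStepEq n a lo hlo (by push_cast at hlen ⊢; omega)
    have hrange : lo + ((k + 1 : Nat) : Int) = (lo + 1) + (k : Int) := by push_cast; ring
    rw [← heq, hrange]
    exact ih (lo + 1) (pvBodyA n a lo) (by omega)
      (by rw [hl]; push_cast at hlen ⊢; omega)

theorem pvPass_eq (n : Int) (arr : List String) : pvPassA n arr = pvPassB n arr := by
  unfold pvPassA pvPassB
  cases harr : arr with
  | nil =>
    rw [PySem.List.pyRange_one_eq_nil (by simp)]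
    rfl
  | cons h t =>
    rw [← harr]
    have hlen : 1 ≤ arr.length := by rw [harr]; simp
    have hb : (arr.length : Int) - 1 = 0 + ((arr.length - 1 : Nat) : Int) := by
      push_cast [hlen]; ring
    rw [hb]
    exact pvPass_aux n (arr.length - 1) 0 arr (le_refl 0) (by push_cast [hlen]; ring)

-- ===== VERDICT (by name: the statement is the Claim_ definition above) =====
theorem solution_spec : Claim_equal_solution := by
  intro strings n _ _
  unfold Spec_solution solution solution_alt
  rw [pvGroup_eq]
  exact pvPass_eq n (pvGroupA strings n)
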